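-- pv_equiv track=rewrite | github.com/majstenmark/kattis | NCPCWarmup6/A.py | solve
-- ===== SOURCE A (Python) =====
-- def solve(N):
--     used = [False] * N
--     index = [i for i in range(N)]
--     order = []
--     step = 1
--     curr = -1
--     while len(order) < N:
--         j = 0
--         while j <= step:
--             curr += 1
--             curr %= N
--             if not used[curr]:
--                 j += 1
--         used[curr] = True
--         order.append(curr)
--
--         step += 1
--
--     out = [0]*N
--     for i,v  in enumerate(order):
--         out[v] = i+1
--
--     return ' '.join(map(str, out))
-- ===== SOURCE B (Python) =====
-- def solve(N):
--     ranks = [0] * N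
--     remaining = list(range(N))
--     idx = 0
--     step = 1
--     t = 1
--     while remaining:
--         idx = (idx + step) % len(remaining)
--         v = remaining.pop(idx)
--         ranks[v] = t
--         t += 1
--         step += 1
--     return ' '.join(map(str, ranks))
-- ===== Notes on version B (the rewrite author's own statement) =====
-- stated objective: faster
-- what changed: B replaces A's cell-by-cell boolean-array scan (advancing one position at a time while counting unused cells) by a list of remaining positions with a modular index jump idx=(idx+step)%len followed by a single pop, eliminating the inner scan entirely.
import Mathlib
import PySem

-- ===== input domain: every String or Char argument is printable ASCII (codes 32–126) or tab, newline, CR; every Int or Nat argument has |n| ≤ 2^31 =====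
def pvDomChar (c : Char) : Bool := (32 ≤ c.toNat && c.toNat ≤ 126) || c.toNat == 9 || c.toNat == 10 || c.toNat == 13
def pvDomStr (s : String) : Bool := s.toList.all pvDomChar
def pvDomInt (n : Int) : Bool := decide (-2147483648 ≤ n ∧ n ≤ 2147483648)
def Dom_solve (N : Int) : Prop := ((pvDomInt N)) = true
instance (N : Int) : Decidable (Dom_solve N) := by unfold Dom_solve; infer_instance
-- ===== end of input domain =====

-- B replaces A's cell-by-cell scan over a boolean array by a remaining-positions list
-- with a modular index jump and a pop (objective: faster; no scan proportional to step).

-- ===== PORT A =====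
-- inner `while j <= step` loop of A; fuel-based (one fuel unit per iteration; the
-- fuel passed by solveAOuter is provably sufficient, see the lemmas below)
def solveAInner (used : List Bool) (n : Int) (step : Int) : Nat → Int → Int → Int
  | 0, curr, _ => curr
  | fuel+1, curr, j =>
      if j ≤ step then
        if PySem.List.pyGetD used (PySem.Int.mod (curr + 1) n) true = false then
          solveAInner used n step fuel (PySem.Int.mod (curr + 1) n) (j + 1)
        else
          solveAInner used n step fuel (PySem.Int.mod (curr + 1) n) j
      else curr

-- outer `while len(order) < N` loop of A (each iteration appends one element, so
-- fuel N.toNat makes the guard and the fuel run out together)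
def solveAOuter (n : Int) : Nat → List Bool → List Int → Int → Int → List Int
  | 0, _, order, _, _ => order
  | fuel+1, used, order, step, curr =>
      if (order.length : Int) < n then
        let c := solveAInner used n step ((step.toNat + 2) * (n.toNat + 1)) curr 0
        solveAOuter n fuel (PySem.List.pySetD used c true) (order ++ [c]) (step + 1) c
      else order

def solve (N : Int) : String :=
  let used := List.replicate N.toNat false
  let _index := PySem.List.pyRange 0 N 1
  let order := solveAOuter N N.toNat used [] 1 (-1)
  let out := (PySem.List.enumerate order 0).foldl
      (fun o iv => PySem.List.pySetD o iv.2 (iv.1 + 1)) (List.replicate N.toNat (0:Int))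
  PySem.Str.join " " (out.map PySem.Int.toStr)

-- ===== PORT B =====
-- `while remaining:` loop of B; fuel = initial length (one pop per iteration)
def solveBLoop : Nat → List Int → List Int → Int → Int → Int → List Int
  | 0, ranks, _, _, _, _ => ranks
  | fuel+1, ranks, remaining, idx, step, t =>
      if remaining.isEmpty then ranks
      else
        let idx' := PySem.Int.mod (idx + step) (remaining.length : Int)
        match PySem.List.pop? remaining idx' with
        | some vr => solveBLoop fuel (PySem.List.pySetD ranks vr.1 t) vr.2 idx' (step + 1) (t + 1)
        | none => ranks  -- unreachable: idx' is always in range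

def solve_alt (N : Int) : String :=
  let ranks := List.replicate N.toNat (0:Int)
  let remaining := PySem.List.pyRange 0 N 1
  let out := solveBLoop N.toNat ranks remaining 0 1 1
  PySem.Str.join " " (out.map PySem.Int.toStr)

-- ===== PRECONDITION & SPEC =====
def Spec_solve (N : Int) (out : String) : Prop := out = solve_alt N
instance (N : Int) (out : String) : Decidable (Spec_solve N out) := by unfold Spec_solve; infer_instance

-- ===== CLAIM (what is proved, stated in full; the proofs are below) =====
def Claim_equal_solve : Prop := ∀ (N : Int), Dom_solve N → Spec_solve N (solve N)

-- ===== LEMMAS AND PROOFS =====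

-- sorted list of still-unused indices of `used`
def unusedL (used : List Bool) : List Nat :=
  (List.range used.length).filter (fun i => used.getD i true = false)

-- number of unused indices ≤ p
def cntLe (used : List Bool) (p : Int) : Nat :=
  ((unusedL used).filter (fun i => Int.ofNat i ≤ p)).length

-- A-side postprocessing: the `out` array built from `order`
def outOf (n : Nat) (order : List Int) : List Int :=
  (PySem.List.enumerate order 0).foldl
    (fun o iv => PySem.List.pySetD o iv.2 (iv.1 + 1)) (List.replicate n (0:Int))

theorem unusedL_pairwise (used : List Bool) : (unusedL used).Pairwise (· < ·) :=
  List.Pairwise.filter _ List.pairwise_lt_range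

theorem unusedL_lt (used : List Bool) {i : Nat} (h : i ∈ unusedL used) : i < used.length := by
  have := List.mem_range.mp (List.mem_of_mem_filter h)
  exact this

theorem mem_unusedL (used : List Bool) (i : Nat) :
    i ∈ unusedL used ↔ i < used.length ∧ used.getD i true = false := by
  simp [unusedL, List.mem_filter, List.mem_range]

-- cast bridge: the Int-level ≤-filter of cntLe against a Nat bound is the Nat-level one
theorem filter_le_cast (L : List Nat) (v : Nat) :
    L.filter (fun i => Int.ofNat i ≤ (v:Int)) = L.filter (fun i => i ≤ v) := by
  apply List.filter_congr
  intro i _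
  simp

-- sorted-count: the number of elements ≤ L[k] in a strictly sorted list is k+1
theorem sorted_count_le {L : List Nat} (hs : L.Pairwise (· < ·)) {k : Nat}
    (hk : k < L.length) {v : Nat} (hv : L[k] = v) :
    (L.filter (fun i => i ≤ v)).length = k + 1 := by
  induction L generalizing k with
  | nil => simp at hk
  | cons a tl ih =>
    rw [List.pairwise_cons] at hs
    obtain ⟨ha, htl⟩ := hs
    cases k with
    | zero =>
      simp only [List.getElem_cons_zero] at hv
      subst hv
      rw [List.filter_cons, if_pos (by simp)]
      have h0 : tl.filter (fun i => decide (i ≤ a)) = [] := by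
        rw [List.filter_eq_nil_iff]
        intro b hb
        have := ha b hb
        simp only [decide_eq_true_eq]
        omega
      rw [List.length_cons, h0]
      rfl
    | succ k =>
      have hk' : k < tl.length := by simpa using hk
      simp only [List.getElem_cons_succ] at hv
      have halt : a < v := hv ▸ ha _ (List.getElem_mem hk')
      rw [List.filter_cons, if_pos (by simp; omega), List.length_cons, ih htl hk' hv]

-- erasing L[k] from a strictly sorted list = filtering out that value
theorem sorted_filter_ne {L : List Nat} (hs : L.Pairwise (· < ·)) {k : Nat}
    (hk : k < L.length) {v : Nat} (hv : L[k] = v) :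
    L.filter (fun i => ¬(i = v)) = L.eraseIdx k := by
  induction L generalizing k with
  | nil => simp at hk
  | cons a tl ih =>
    rw [List.pairwise_cons] at hs
    obtain ⟨ha, htl⟩ := hs
    cases k with
    | zero =>
      simp only [List.getElem_cons_zero] at hv
      subst hv
      rw [List.eraseIdx_cons_zero, List.filter_cons, if_neg (by simp)]
      rw [List.filter_eq_self.mpr]
      intro b hb
      have := ha b hb
      simp only [decide_eq_true_eq]
      omega
    | succ k =>
      have hk' : k < tl.length := by simpa using hk
      simp only [List.getElem_cons_succ] at hv
      have halt : a < v := hv ▸ ha _ (List.getElem_mem hk')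
      rw [List.eraseIdx_cons_succ, List.filter_cons, if_pos (by simp; omega), ih htl hk' hv]

-- count ≤ L[k] after erasing index k
theorem sorted_count_erase {L : List Nat} (hs : L.Pairwise (· < ·)) {k : Nat}
    (hk : k < L.length) {v : Nat} (hv : L[k] = v) :
    ((L.eraseIdx k).filter (fun i => i ≤ v)).length = k := by
  induction L generalizing k with
  | nil => simp at hk
  | cons a tl ih =>
    rw [List.pairwise_cons] at hs
    obtain ⟨ha, htl⟩ := hs
    cases k with
    | zero =>
      simp only [List.getElem_cons_zero] at hv
      subst hv
      rw [List.eraseIdx_cons_zero, List.filter_eq_nil_iff.mpr]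
      · rfl
      · intro b hb
        have := ha b hb
        simp only [decide_eq_true_eq]
        omega
    | succ k =>
      have hk' : k < tl.length := by simpa using hk
      simp only [List.getElem_cons_succ] at hv
      have halt : a < v := hv ▸ ha _ (List.getElem_mem hk')
      rw [List.eraseIdx_cons_succ, List.filter_cons, if_pos (by simp; omega),
        List.length_cons, ih htl hk' hv]

-- one pure "hop": the next unused position after p, cyclically
-- an antitone filter of a strictly sorted list is a prefix
theorem filter_antitone_take {L : List Nat} (hs : L.Pairwise (· < ·)) (q : Nat → Bool)
    (hq : ∀ a b, a ≤ b → q b = true → q a = true) :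
    L.filter q = L.take ((L.filter q).length) := by
  induction L with
  | nil => rfl
  | cons a tl ih =>
    rw [List.pairwise_cons] at hs
    obtain ⟨ha, htl⟩ := hs
    rw [List.filter_cons]
    cases hqa : q a with
    | true =>
      rw [if_pos rfl]
      rw [List.length_cons, List.take_succ_cons]
      exact congrArg _ (ih htl)
    | false =>
      rw [if_neg (by simp)]  -- q a = false case
      have h0 : tl.filter q = [] := by
        rw [List.filter_eq_nil_iff]
        intro b hb hqb
        have := hq a b (Nat.le_of_lt (ha b hb)) hqb
        rw [hqa] at this
        exact Bool.false_ne_true this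
      rw [h0]
      rfl

-- q L[m] is true for every index below the filter length, false at the filter length
theorem filter_antitone_true {L : List Nat} (hs : L.Pairwise (· < ·)) (q : Nat → Bool)
    (hq : ∀ a b, a ≤ b → q b = true → q a = true) {m : Nat}
    (hm : m < (L.filter q).length) (hmL : m < L.length) : q L[m] = true := by
  have htake := filter_antitone_take hs q hq
  have hmem : L[m] ∈ L.filter q := by
    rw [htake]
    have hmt : m < (L.take ((L.filter q).length)).length := by
      simp [List.length_take]; omega
    have hg : (L.take ((L.filter q).length))[m] = L[m] := List.getElem_take
    exact hg ▸ List.getElem_mem hmt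
  exact (List.mem_filter.mp hmem).2

theorem filter_antitone_false {L : List Nat} (hs : L.Pairwise (· < ·)) (q : Nat → Bool)
    (hq : ∀ a b, a ≤ b → q b = true → q a = true)
    (hc : (L.filter q).length < L.length) : q L[(L.filter q).length] = false := by
  set c0 := (L.filter q).length with hc0
  by_contra hculp
  have hqt : q L[c0] = true := by
    cases h : q L[c0]
    · exact absurd h hculp
    · rfl
  -- every element of take (c0+1) satisfies q, so countP ≥ c0+1
  have hmono := List.pairwise_iff_getElem.mp hs
  have hcount : (L.take (c0+1)).countP q = c0 + 1 := by
    rw [List.countP_eq_length.mpr]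
    · simp [List.length_take]; omega
    · intro x hx
      obtain ⟨m, hm, hxm⟩ := List.getElem_of_mem hx
      have hmlen : m < c0 + 1 := by
        have := hm
        simp [List.length_take] at this
        omega
      have hmL : m < L.length := by omega
      have hx' : x = L[m] := by
        rw [← hxm]
        exact List.getElem_take
      have hle : L[m] ≤ L[c0] := by
        rcases Nat.lt_or_ge m c0 with h | h
        · exact Nat.le_of_lt (hmono m c0 (by omega) hc h)
        · have : m = c0 := by omega
          subst this; rfl
      exact hx' ▸ hq _ _ hle hqt
  have hsplit : L.countP q = (L.take (c0+1)).countP q + (L.drop (c0+1)).countP q := by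
    rw [← List.countP_append, List.take_append_drop]
  have : L.countP q = c0 := by
    simp [hc0, List.countP_eq_length_filter]
  omega

theorem walk_lemma (used : List Bool) (n : Nat) (hn : used.length = n) (step j : Int)
    (hj : j ≤ step) :
    ∀ (d : Nat) (f : Nat) (curr : Int) (target : Nat), 1 ≤ d → -1 ≤ curr →
    (target : Int) = curr + d → target < n →
    (∀ i : Nat, curr < (i:Int) → i < target → used.getD i true = true) →
    used.getD target true = false →
    solveAInner used (n:Int) step (f + d) curr j
      = solveAInner used (n:Int) step f (target : Int) (j+1) := by
  intro d
  induction d with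
  | zero => omega
  | succ d ih =>
    intro f curr target _ hc1 htar htn hbet htf
    have hmod : PySem.Int.mod (curr + 1) (n:Int) = curr + 1 := by
      rw [PySem.Int.mod_eq_emod_of_pos (by exact_mod_cast Nat.pos_of_ne_zero (by omega))]
      exact Int.emod_eq_of_lt (by omega) (by push_cast at htar ⊢; omega)
    rw [show f + (d+1) = (f+d)+1 from rfl, solveAInner, if_pos hj, hmod]
    cases d with
    | zero =>
      have he : curr + 1 = ((target:Nat):Int) := by push_cast at htar ⊢; omega
      rw [he, PySem.List.pyGetD_natCast, if_pos htf]
      rfl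
    | succ d' =>
      have he : curr + 1 = (((curr+1).toNat : Nat):Int) := by omega
      rw [he, PySem.List.pyGetD_natCast]
      have hu : used.getD (curr+1).toNat true = true := by
        apply hbet <;> omega
      rw [hu]
      rw [if_neg (by simp)]
      rw [← he]
      exact ih f (curr+1) target (by omega) (by omega) (by push_cast at htar ⊢; omega) htn
        (fun i h1 h2 => hbet i (by omega) h2) htf

theorem walk_used (used : List Bool) (n : Nat) (hn0 : 0 < n) (step j : Int) (hj : j ≤ step) :
    ∀ (d : Nat) (f : Nat) (curr : Int), 0 ≤ curr → (n:Int) - 1 = curr + d →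
    (∀ i : Nat, curr < (i:Int) → i < n → used.getD i true = true) →
    solveAInner used (n:Int) step (f + d) curr j
      = solveAInner used (n:Int) step f ((n:Int) - 1) j := by
  intro d
  induction d with
  | zero =>
    intro f curr hc0 hd _
    have : curr = (n:Int) - 1 := by omega
    rw [this]
    rfl
  | succ d ih =>
    intro f curr hc0 hd hbet
    have hmod : PySem.Int.mod (curr + 1) (n:Int) = curr + 1 := by
      rw [PySem.Int.mod_eq_emod_of_pos (by exact_mod_cast hn0)]
      exact Int.emod_eq_of_lt (by omega) (by omega)
    rw [show f + (d+1) = (f+d)+1 from rfl, solveAInner, if_pos hj, hmod]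
    have he : curr + 1 = (((curr+1).toNat : Nat):Int) := by omega
    have hu : used.getD (curr+1).toNat true = true := by
      apply hbet <;> omega
    rw [he, PySem.List.pyGetD_natCast, hu, if_neg (by simp), ← he]
    exact ih f (curr+1) (by omega) (by omega) (fun i h1 h2 => hbet i (by omega) h2)

theorem wrap_step (used : List Bool) (n : Nat) (hn : 0 < n) (step j : Int) (hj : j ≤ step)
    (f : Nat) :
    solveAInner used (n:Int) step (f + 1) ((n:Int) - 1) j
      = solveAInner used (n:Int) step (f + 1) (-1) j := by
  have h1 : PySem.Int.mod ((n:Int) - 1 + 1) (n:Int) = 0 := by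
    rw [PySem.Int.mod_eq_emod_of_pos (by exact_mod_cast hn)]
    simp
  have h2 : PySem.Int.mod (-1 + 1) (n:Int) = 0 := by
    rw [PySem.Int.mod_eq_emod_of_pos (by exact_mod_cast hn)]
    simp
  rw [solveAInner, solveAInner, if_pos hj, if_pos hj, h1, h2]

def nextU (used : List Bool) (p : Int) : Int :=
  (((unusedL used).getD (cntLe used p % (unusedL used).length) 0 : Nat) : Int)

theorem unused_getD (used : List Bool) {i : Nat} (hi : i < used.length)
    (h : i ∉ unusedL used) : used.getD i true = true := by
  rw [mem_unusedL] at h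
  cases hg : used.getD i true
  · exact absurd ⟨hi, hg⟩ h
  · rfl

theorem hop_lemma (used : List Bool) (n : Nat) (hn : used.length = n) (hn0 : 0 < n)
    (hr : 0 < (unusedL used).length) (step j curr : Int) (hj : j ≤ step)
    (hc1 : -1 ≤ curr) (hc2 : curr < n) :
    ∃ d : Nat, 1 ≤ d ∧ d ≤ n ∧ ∀ f : Nat,
      solveAInner used (n:Int) step (f + d) curr j
        = solveAInner used (n:Int) step f (nextU used curr) (j+1) := by
  set L := unusedL used with hL
  set r := L.length with hrdef
  set q : Nat → Bool := fun i => decide (Int.ofNat i ≤ curr) with hqdef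
  have hq : ∀ a b : Nat, a ≤ b → q b = true → q a = true := by
    intro a b hab hb
    simp only [hqdef, Int.ofNat_eq_natCast, decide_eq_true_eq] at hb ⊢
    omega
  have hs : L.Pairwise (· < ·) := unusedL_pairwise used
  have hmono := List.pairwise_iff_getElem.mp hs
  have hc0def : cntLe used curr = (L.filter q).length := rfl
  set c0 := cntLe used curr with hc0
  have hcle : c0 ≤ r := by
    rw [hc0def, hrdef]
    exact List.length_filter_le _ _
  have hLlt : ∀ {m : Nat} (hm : m < r), L[m] < n := by
    intro m hm
    exact hn ▸ unusedL_lt used (List.getElem_mem hm)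
  have hLunused : ∀ {m : Nat} (hm : m < r), used.getD L[m] true = false := by
    intro m hm
    exact ((mem_unusedL used _).mp (List.getElem_mem hm)).2
  rcases Nat.lt_or_ge c0 r with hlt | hge
  · -- there is an unused position strictly after curr
    have hqf : q L[c0] = false := by
      have := filter_antitone_false hs q hq (hc0def ▸ hlt)
      simpa [← hc0def] using this
    have ha : curr < (L[c0] : Int) := by
      simp only [hqdef, decide_eq_false_iff_not, Int.ofNat_eq_natCast] at hqf
      omega
    have hbet : ∀ i : Nat, curr < (i:Int) → i < L[c0] → used.getD i true = true := by
      intro i hi1 hi2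
      apply unused_getD used (by have := hLlt hlt; omega)
      intro hmem
      rw [← hL] at hmem
      obtain ⟨m, hm, hjm⟩ := List.getElem_of_mem hmem
      rcases Nat.lt_or_ge m c0 with h | h
      · have := filter_antitone_true hs q hq (hc0def ▸ h) (hL ▸ hm)
        simp only [hqdef, Int.ofNat_eq_natCast, decide_eq_true_eq] at this
        rw [hjm] at this
        omega
      · rcases Nat.eq_or_lt_of_le h with h' | h'
        · subst h'; omega
        · have := hmono c0 m hlt hm h'
          omega
    have htf : used.getD L[c0] true = false := hLunused hlt
    refine ⟨((L[c0] : Int) - curr).toNat, by omega, ?_, ?_⟩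
    · have := hLlt hlt
      omega
    · intro f
      have hwalk := walk_lemma used n hn step j hj ((L[c0] - curr : Int)).toNat f curr L[c0]
        (by omega) hc1 (by push_cast; omega) (hLlt hlt) hbet htf
      rw [hwalk]
      have : nextU used curr = (L[c0] : Int) := by
        unfold nextU
        rw [← hL, ← hc0, ← hrdef, Nat.mod_eq_of_lt hlt, List.getD_eq_getElem _ _ hlt]
      rw [this]
  · -- wrap around: everything unused is ≤ curr
    have heq : c0 = r := le_antisymm hcle hge
    have hfei : L.filter q = L := by
      apply List.Sublist.eq_of_length List.filter_sublist
      rw [← hc0def, heq, hrdef]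
    have hall : ∀ x ∈ L, (x : Int) ≤ curr := by
      intro x hx
      have : x ∈ L.filter q := by rw [hfei]; exact hx
      have := (List.mem_filter.mp this).2
      simpa [hqdef, Int.ofNat_eq_natCast] using this
    have h0 : 0 < r := hr
    have h0v : L[0] < n := hLlt h0
    have hcurr0 : (L[0] : Int) ≤ curr := hall _ (List.getElem_mem h0)
    have h0min : ∀ i : Nat, i < L[0] → used.getD i true = true := by
      intro i hi
      apply unused_getD used (by omega)
      intro hmem
      rw [← hL] at hmem
      obtain ⟨m, hm, hjm⟩ := List.getElem_of_mem hmem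
      rcases Nat.eq_or_lt_of_le (Nat.zero_le m) with h' | h'
      · subst h'; omega
      · have := hmono 0 m h0 hm h'
        omega
    have hsuf : ∀ i : Nat, curr < (i:Int) → i < n → used.getD i true = true := by
      intro i hi1 hi2
      apply unused_getD used (by omega)
      intro hmem
      rw [← hL] at hmem
      have := hall i hmem
      omega
    refine ⟨((n:Int) - 1 - curr).toNat + (L[0] + 1), by omega, by omega, ?_⟩
    intro f
    rw [show f + (((n:Int) - 1 - curr).toNat + (L[0] + 1))
        = (f + (L[0] + 1)) + ((n:Int) - 1 - curr).toNat from by omega]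
    rw [walk_used used n hn0 step j hj _ _ curr (by omega) (by omega) hsuf]
    rw [show f + (L[0] + 1) = (f + L[0]) + 1 from by omega]
    rw [wrap_step used n hn0 step j hj]
    have hwalk := walk_lemma used n hn step j hj (L[0] + 1) f (-1) L[0]
      (by omega) (by omega) (by push_cast; omega) h0v
      (fun i h1 h2 => h0min i h2) (hLunused h0)
    rw [show (f + L[0]) + 1 = f + (L[0] + 1) from by omega, hwalk]
    have : nextU used curr = (L[0] : Int) := by
      unfold nextU
      rw [← hL, ← hc0, ← hrdef, heq, Nat.mod_self, List.getD_eq_getElem _ _ h0]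
    rw [this]

def iterU (used : List Bool) : Nat → Int → Int
  | 0, p => p
  | k+1, p => iterU used k (nextU used p)

theorem nextU_range (used : List Bool) (n : Nat) (hn : used.length = n)
    (hr : 0 < (unusedL used).length) (p : Int) :
    0 ≤ nextU used p ∧ nextU used p < n := by
  unfold nextU
  have hm : cntLe used p % (unusedL used).length < (unusedL used).length := Nat.mod_lt _ hr
  rw [List.getD_eq_getElem _ _ hm]
  have := hn ▸ unusedL_lt used (List.getElem_mem hm)
  omega

theorem inner_iter (used : List Bool) (n : Nat) (hn : used.length = n) (hn0 : 0 < n)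
    (hr : 0 < (unusedL used).length) (step : Int) :
    ∀ (k : Nat) (curr j : Int) (f : Nat), -1 ≤ curr → curr < n →
    j = step + 1 - k → 0 ≤ j → k * n ≤ f →
    solveAInner used (n:Int) step f curr j = iterU used k curr := by
  intro k
  induction k with
  | zero =>
    intro curr j f _ _ hjd _ _
    have hj : ¬ j ≤ step := by omega
    cases f with
    | zero => rfl
    | succ f => rw [solveAInner, if_neg hj]; rfl
  | succ k ih =>
    intro curr j f hc1 hc2 hjd hj0 hf
    have hj : j ≤ step := by push_cast at hjd; omega
    obtain ⟨d, hd1, hdn, hstep⟩ := hop_lemma used n hn hn0 hr step j curr hj hc1 hc2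
    have hexp : (k+1)*n = k*n + n := by ring
    have hfd : f = (f - d) + d := by omega
    rw [hfd, hstep (f - d)]
    obtain ⟨hnx1, hnx2⟩ := nextU_range used n hn hr curr
    rw [show iterU used (k+1) curr = iterU used k (nextU used curr) from rfl]
    exact ih (nextU used curr) (j+1) (f - d) (by omega) hnx2
      (by push_cast at hjd ⊢; omega) (by omega) (by omega)

theorem cnt_nextU (used : List Bool) (hr : 0 < (unusedL used).length) (p : Int) :
    cntLe used (nextU used p) = cntLe used p % (unusedL used).length + 1 := by
  have hm : cntLe used p % (unusedL used).length < (unusedL used).length := Nat.mod_lt _ hr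
  unfold cntLe nextU
  rw [List.getD_eq_getElem _ _ hm, filter_le_cast]
  exact sorted_count_le (unusedL_pairwise used) hm rfl

theorem iterU_char (used : List Bool) (n : Nat) (hn : used.length = n)
    (hr : 0 < (unusedL used).length) :
    ∀ (k : Nat) (p : Int),
    iterU used (k+1) p
      = (((unusedL used).getD ((cntLe used p + k) % (unusedL used).length) 0 : Nat) : Int) := by
  intro k
  induction k with
  | zero =>
    intro p
    rw [show iterU used 1 p = nextU used p from rfl]
    rw [Nat.add_zero]
    rfl
  | succ k ih =>
    intro p
    rw [show iterU used (k+1+1) p = iterU used (k+1) (nextU used p) from rfl, ih]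
    rw [cnt_nextU used hr]
    congr 1
    rw [Nat.add_assoc, Nat.mod_add_mod, Nat.add_comm 1 k]


-- setting a selected position to used erases it from the unused list
theorem unusedL_set (used : List Bool) {k : Nat} (hk : k < (unusedL used).length) :
    unusedL (used.set (unusedL used)[k] true) = (unusedL used).eraseIdx k := by
  have hvlen : (unusedL used)[k] < used.length := unusedL_lt used (List.getElem_mem hk)
  set v := (unusedL used)[k] with hv
  have hcongr : ∀ i ∈ List.range used.length,
      (decide ((used.set v true).getD i true = false))
        = ((decide (¬ i = v)) && decide (used.getD i true = false)) := by
    intro i hi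
    have hi' : i < used.length := List.mem_range.mp hi
    by_cases hiv : i = v
    · have hset : (used.set v true)[v]? = some true := List.getElem?_set_self (by omega)
      simp [List.getD, hiv, hset]
    · have hset : (used.set v true)[i]? = used[i]? := List.getElem?_set_ne (by omega)
      simp [List.getD, hset, hiv]
  calc unusedL (used.set v true)
      = (List.range used.length).filter
          (fun i => decide ((used.set v true).getD i true = false)) := by
        unfold unusedL
        rw [List.length_set]
    _ = (List.range used.length).filter
          (fun i => (decide (¬ i = v)) && decide (used.getD i true = false)) :=
        List.filter_congr hcongr
    _ = (unusedL used).filter (fun i => decide (¬ i = v)) := by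
        rw [← List.filter_filter]
        rfl
    _ = (unusedL used).eraseIdx k := sorted_filter_ne (unusedL_pairwise used) hk hv.symm

-- count of remaining elements ≤ the popped value, after the pop
theorem cntLe_after_set (used : List Bool) {k : Nat} (hk : k < (unusedL used).length) :
    cntLe (used.set (unusedL used)[k] true) (((unusedL used)[k] : Nat) : Int) = k := by
  unfold cntLe
  rw [unusedL_set used hk, filter_le_cast]
  exact sorted_count_erase (unusedL_pairwise used) hk rfl

-- outOf extends on the right by a single assignment
theorem outOf_append (n : Nat) (order : List Int) (c : Int) :
    outOf n (order ++ [c])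
      = PySem.List.pySetD (outOf n order) c ((order.length : Int) + 1) := by
  unfold outOf
  rw [PySem.List.enumerate_append, List.foldl_append, PySem.List.enumerate_cons,
    PySem.List.enumerate_nil, List.foldl_cons, List.foldl_nil]
  norm_num

-- the main loop correspondence
theorem loops_eq (N : Int) (n : Nat) (hN : N = (n:Int)) (hn0 : 0 < n) :
    ∀ (fuel : Nat) (used : List Bool) (order : List Int) (step curr idx : Int)
      (ranks remaining : List Int),
    used.length = n →
    remaining = (unusedL used).map Int.ofNat →
    fuel = (unusedL used).length →
    order.length + fuel = n →
    idx = (cntLe used curr : Int) →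
    -1 ≤ curr → curr < n →
    step = (order.length : Int) + 1 →
    ranks = outOf n order →
    outOf n (solveAOuter N fuel used order step curr)
      = solveBLoop fuel ranks remaining idx step step := by
  subst hN
  intro fuel
  induction fuel with
  | zero =>
    intro used order step curr idx ranks remaining _ _ _ _ _ _ _ _ hranks
    simp only [solveAOuter, solveBLoop]
    exact hranks.symm
  | succ fuel ih =>
    intro used order step curr idx ranks remaining hlen hrem hfuel horder hidx hc1 hc2 hstep hranks
    have hr : 0 < (unusedL used).length := by omega
    have hstep0 : 0 < step := by
      have : (0:Int) ≤ (order.length : Int) := by positivity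
      omega
    set sN := step.toNat with hsNdef
    have hsNc : (sN : Int) = step := Int.toNat_of_nonneg (by omega)
    set m := (cntLe used curr + sN) % (unusedL used).length with hmdef
    have hmlt : m < (unusedL used).length := Nat.mod_lt _ hr
    set c : Int := (((unusedL used)[m] : Nat) : Int) with hcdef
    have hvlt : (unusedL used)[m] < n := by
      have := unusedL_lt used (List.getElem_mem hmlt)
      omega
    -- the inner scan lands on the m-th unused position
    have hinner : solveAInner used ((n:Nat):Int) step
        ((step.toNat + 2) * (((n:Nat):Int).toNat + 1)) curr 0 = c := by
      rw [inner_iter used n hlen hn0 hr step (sN+1) curr 0 _ hc1 hc2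
        (by push_cast [hsNc]; omega) (by omega)
        (by rw [Int.toNat_natCast]
            calc (sN+1) * n ≤ (sN+2) * n := Nat.mul_le_mul_right n (by omega)
              _ ≤ (sN+2) * (n+1) := Nat.mul_le_mul_left (sN+2) (by omega))]
      rw [iterU_char used n hlen hr sN curr, ← hmdef, List.getD_eq_getElem _ _ hmlt]
    -- one step of the A loop
    have hcond : ((order.length : Nat) : Int) < ((n:Nat):Int) := by push_cast; omega
    -- one step of the B loop
    have hremlen : remaining.length = fuel + 1 := by
      rw [hrem, List.length_map]; omega
    have hre : remaining.isEmpty = false := by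
      cases hrm : remaining with
      | nil => rw [hrm] at hremlen; simp at hremlen
      | cons x xs => rfl
    have hmod : PySem.Int.mod (idx + step) ((remaining.length : Nat) : Int) = ((m:Nat):Int) := by
      rw [hidx, ← hsNc, hremlen, hfuel]
      rw [show ((cntLe used curr : Nat) : Int) + ((sN:Nat):Int)
            = (((cntLe used curr + sN : Nat)) : Int) by push_cast; ring]
      rw [PySem.Int.mod_natCast]
    have hpop : PySem.List.pop? remaining ((m:Nat):Int)
        = some (c, remaining.eraseIdx m) := by
      rw [PySem.List.pop?_natCast remaining m (by omega)]
      have : remaining[m]'(by omega) = c := by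
        subst hrem
        rw [List.getElem_map]
        rw [hcdef, Int.ofNat_eq_natCast]
      rw [this]
    have hB : solveBLoop (fuel+1) ranks remaining idx step step
        = solveBLoop fuel (PySem.List.pySetD ranks c step) (remaining.eraseIdx m)
            ((m:Nat):Int) (step+1) (step+1) := by
      rw [solveBLoop]
      rw [if_neg (by rw [hre]; simp)]
      simp only [hmod, hpop]
    rw [hB]
    simp only [solveAOuter]
    rw [if_pos hcond, hinner]
    rw [show PySem.List.pySetD used c true = used.set (unusedL used)[m] true from
      PySem.List.pySetD_natCast ..]
    -- apply the induction hypothesis to the new state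
    apply ih (used.set (unusedL used)[m] true) (order ++ [c]) (step+1) c ((m:Nat):Int)
      (PySem.List.pySetD ranks c step) (remaining.eraseIdx m)
    · rw [List.length_set, hlen]
    · rw [unusedL_set used hmlt, ← List.eraseIdx_map, ← hrem]
    · rw [unusedL_set used hmlt, List.length_eraseIdx]
      simp only [hmlt, if_pos]
      omega
    · simp only [List.length_append, List.length_cons, List.length_nil]
      omega
    · rw [hcdef, cntLe_after_set used hmlt]
    · have : (0:Int) ≤ c := by rw [hcdef]; positivity
      omega
    · rw [hcdef]
      exact_mod_cast hvlt
    · simp only [List.length_append, List.length_cons, List.length_nil]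
      push_cast
      omega
    · rw [outOf_append, ← hranks, ← hstep]

theorem unusedL_replicate (n : Nat) : unusedL (List.replicate n false) = List.range n := by
  unfold unusedL
  rw [List.length_replicate]
  apply List.filter_eq_self.mpr
  intro i hi
  have hi' : i < n := List.mem_range.mp hi
  have : (List.replicate n false)[i]? = some false := by
    rw [List.getElem?_replicate, if_pos hi']
  simp [List.getD, this]

theorem cntLe_neg_one (used : List Bool) : cntLe used (-1) = 0 := by
  unfold cntLe
  rw [List.filter_eq_nil_iff.mpr]
  · rfl
  · intro i _
    simp only [decide_eq_true_eq, Int.ofNat_eq_natCast]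
    omega

theorem solve_eq_alt (N : Int) : solve N = solve_alt N := by
  by_cases hneg : N ≤ 0
  · have h0 : N.toNat = 0 := Int.toNat_of_nonpos hneg
    simp only [solve, solve_alt, h0, List.replicate_zero, solveAOuter, solveBLoop,
      PySem.List.enumerate_nil, List.foldl_nil, List.map_nil]
  · have hpos : 0 < N := by omega
    set n := N.toNat with hndef
    have hN : N = (n : Int) := (Int.toNat_of_nonneg (by omega)).symm
    have hn0 : 0 < n := by omega
    have key := loops_eq N n hN hn0 n (List.replicate n false) [] 1 (-1) 0
      (List.replicate n (0:Int)) (PySem.List.pyRange 0 N 1)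
      (by rw [List.length_replicate])
      (by rw [unusedL_replicate, PySem.List.pyRange_one, hN]
          simp [Int.ofNat_eq_natCast])
      (by rw [unusedL_replicate, List.length_range])
      (by simp)
      (by rw [cntLe_neg_one]; rfl)
      (by omega)
      (by show (-1:Int) < (n:Int); omega)
      (by simp)
      (by simp [outOf, PySem.List.enumerate_nil])
    simp only [solve, solve_alt, ← hndef]
    rw [show (PySem.List.enumerate (solveAOuter N n (List.replicate n false) [] 1 (-1)) 0).foldl
        (fun o iv => PySem.List.pySetD o iv.2 (iv.1 + 1)) (List.replicate n (0:Int))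
        = outOf n (solveAOuter N n (List.replicate n false) [] 1 (-1)) from rfl]
    rw [key]

-- ===== VERDICT (by name: the statement is the Claim_ definition above) =====
theorem solve_spec : Claim_equal_solve := by
  intro N _
  unfold Spec_solve
  exact solve_eq_alt N
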